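-- pv_equiv track=rewrite | github.com/kurrrru/atcoder | ARC/151~200/163/A/A.py | check
-- ===== SOURCE A (Python) =====
-- def check(N,S):
--     for i in range(N-1,0,-1):
--         if S[i]>S[0]:
--             return True
--         elif S[i]==S[0]:
--             if S[i:]>S[0:i]:
--                 return True
--     return False
-- ===== SOURCE B (Python) =====
-- def _lcp_suffix(S, i, M):
--     # length of the longest common prefix of S[i:] and S
--     l = 0
--     while i + l < M and S[i + l] == S[l]:
--         l += 1
--     return l
--
--
-- def check(N, S):
--     M = len(S)
--     for i in range(1, N):
--         z = _lcp_suffix(S, i, M)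
--         if z >= i:
--             if M - i > i:
--                 return True
--         elif i + z < M and S[i + z] > S[z]:
--             return True
--     return False
-- ===== Notes on version B (the rewrite author's own statement) =====
-- stated objective: alternative
-- what changed: B decides each split i in O(1) from the longest-common-prefix length of S with the suffix S[i:] (a Z-array value computed by direct character matching), instead of A's per-position character test followed by a Python lexicographic slice comparison; A's reverse early-return scan becomes a forward scan (the result is an existential, so order is irrelevant).
import Mathlib
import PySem

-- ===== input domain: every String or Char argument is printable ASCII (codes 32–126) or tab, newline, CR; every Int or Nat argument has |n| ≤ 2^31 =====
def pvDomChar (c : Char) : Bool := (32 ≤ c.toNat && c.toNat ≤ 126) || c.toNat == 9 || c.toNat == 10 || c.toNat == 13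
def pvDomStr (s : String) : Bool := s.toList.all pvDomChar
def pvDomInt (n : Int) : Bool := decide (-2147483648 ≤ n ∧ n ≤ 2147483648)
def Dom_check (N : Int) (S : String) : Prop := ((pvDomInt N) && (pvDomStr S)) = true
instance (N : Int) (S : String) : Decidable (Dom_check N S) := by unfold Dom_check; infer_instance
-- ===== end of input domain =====

-- B replaces A's per-position character test plus Python slice comparison by an O(1) decision
-- from the lcp of S with each suffix (objective: alternative algorithm; return values proved equal).

-- ===== PORT A =====
-- the loop 'for i in range(N-1,0,-1)' with early return; S[i] / S[0] via pyGet? (none = IndexError,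
-- then the Python raises: such inputs are outside Pre_check and the port returns false there)
def checkLoopA (cs : List Char) : List Int → Bool
  | [] => false
  | i :: rest =>
    match PySem.List.pyGet? cs i, PySem.List.pyGet? cs 0 with
    | some ci, some c0 =>
      if c0 < ci then true                                    -- S[i] > S[0]
      else if ci = c0 then                                    -- S[i] == S[0]
        if PySem.List.slice cs (some 0) (some i) < PySem.List.slice cs (some i) none  -- S[i:] > S[0:i]
        then true
        else checkLoopA cs rest
      else checkLoopA cs rest
    | _, _ => false

def check (N : Int) (S : String) : Bool :=
  checkLoopA S.toList (PySem.List.pyRange (N - 1) 0 (-1))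

-- ===== PORT B =====
-- _lcp_suffix(S, i, M): 'l = 0; while i+l < M and S[i+l] == S[l]: l += 1; return l', i.e. the
-- length of the longest common prefix of S[i:] and S — as structural recursion on the two lists
def lcpLen : List Char → List Char → Nat
  | a :: x, b :: y => if a = b then lcpLen x y + 1 else 0
  | _, _ => 0

-- the loop 'for i in range(1, N)' of Source B with early return
def checkLoopB (cs : List Char) (M : Int) : List Int → Bool
  | [] => false
  | i :: rest =>
    let z : Int := (lcpLen (cs.drop i.toNat) cs : Nat)
    if z ≥ i then
      if M - i > i then true else checkLoopB cs M rest
    else if i + z < M then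
      if PySem.List.pyGetD cs z ' ' < PySem.List.pyGetD cs (i + z) ' '   -- S[i+z] > S[z]
      then true
      else checkLoopB cs M rest
    else checkLoopB cs M rest

def check_alt (N : Int) (S : String) : Bool :=
  checkLoopB S.toList (PySem.Str.len S) (PySem.List.pyRange 1 N 1)

-- ===== PRECONDITION & SPEC =====
-- A raises IndexError at S[N-1] as soon as the loop runs past the string: excluded here.
def Pre_check (N : Int) (S : String) : Prop := N ≤ 1 ∨ N ≤ PySem.Str.len S
instance (N : Int) (S : String) : Decidable (Pre_check N S) := by unfold Pre_check; infer_instance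

def pvWitness_check : Int × String := (3, "aba")

def Spec_check (N : Int) (S : String) (out : Bool) : Prop := out = check_alt N S
instance (N : Int) (S : String) (out : Bool) : Decidable (Spec_check N S out) := by unfold Spec_check; infer_instance

-- ===== CLAIM (what is proved, stated in full; the proofs are below) =====
def Claim_equal_check : Prop := ∀ (N : Int) (S : String), Dom_check N S → Pre_check N S → Spec_check N S (check N S)

-- ===== LEMMAS AND PROOFS =====

-- basic facts about lcpLen
theorem lcpLen_le_left (x y : List Char) : lcpLen x y ≤ x.length := by
  induction x generalizing y with
  | nil => simp [lcpLen]
  | cons a x ih =>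
    cases y with
    | nil => simp [lcpLen]
    | cons b y => by_cases h : a = b <;> simp [lcpLen, h]; exact ih y

theorem lcpLen_comm (x y : List Char) : lcpLen x y = lcpLen y x := by
  induction x generalizing y with
  | nil => cases y <;> simp [lcpLen]
  | cons a x ih =>
    cases y with
    | nil => simp [lcpLen]
    | cons b y =>
      by_cases h : a = b
      · subst h; simp [lcpLen, ih]
      · simp only [lcpLen]
        rw [if_neg h, if_neg (fun h' => h h'.symm)]

theorem lcpLen_take (x y : List Char) (n : Nat) :
    lcpLen x (y.take n) = min (lcpLen x y) n := by
  induction x generalizing y n with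
  | nil => simp [lcpLen]
  | cons a x ih =>
    cases y with
    | nil => simp [lcpLen]
    | cons b y =>
      cases n with
      | zero => simp [lcpLen]
      | succ k =>
        by_cases h : a = b
        · simp [lcpLen, h, ih, Nat.add_min_add_right]
        · simp [lcpLen, h]

-- lexicographic '<' on List Char read off from the lcp length
theorem lt_iff_lcp (x y : List Char) :
    x < y ↔ ((lcpLen x y < x.length ∧ lcpLen x y < y.length ∧
               x.getD (lcpLen x y) ' ' < y.getD (lcpLen x y) ' ') ∨
             (lcpLen x y = x.length ∧ x.length < y.length)) := by
  induction x generalizing y with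
  | nil =>
    cases y with
    | nil => simp [lcpLen]
    | cons b y => simp [lcpLen, List.nil_lt_cons]
  | cons a x ih =>
    cases y with
    | nil => simp [lcpLen, List.not_lt_nil]
    | cons b y =>
      rw [List.cons_lt_cons_iff]
      by_cases h : a = b
      · subst h
        have hl : lcpLen (a :: x) (a :: y) = lcpLen x y + 1 := by simp [lcpLen]
        rw [hl]
        simp only [List.length_cons, List.getD_cons_succ, Nat.add_lt_add_iff_right,
          Nat.add_right_cancel_iff]
        rw [ih y]
        have hirr : ¬ (a < a) := Char.lt_irrefl a
        tauto
      · have hl : lcpLen (a :: x) (b :: y) = 0 := by simp [lcpLen, h]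
        rw [hl]
        simp [h]

-- head comparison of take/drop at a split 1 ≤ n < length
theorem take_lt_drop_head (cs : List Char) (n : Nat) (h0 : 0 < cs.length)
    (h2 : n < cs.length) (h1 : 1 ≤ n) (hlt : cs.take n < cs.drop n) :
    cs[0]'h0 < cs[n]'h2 ∨ cs[n]'h2 = cs[0]'h0 := by
  cases cs with
  | nil => simp at h2
  | cons c t =>
    obtain ⟨m, rfl⟩ : ∃ m, n = m + 1 := ⟨n - 1, by omega⟩
    rw [List.take_succ_cons, List.drop_eq_getElem_cons h2, List.cons_lt_cons_iff] at hlt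
    simp only [List.getElem_cons_zero]
    rcases hlt with h | ⟨h, _⟩
    · exact Or.inl h
    · exact Or.inr h.symm

theorem head_lt_take_lt_drop (cs : List Char) (n : Nat) (h0 : 0 < cs.length)
    (h2 : n < cs.length) (h1 : 1 ≤ n) (h : cs[0]'h0 < cs[n]'h2) :
    cs.take n < cs.drop n := by
  cases cs with
  | nil => simp at h2
  | cons c t =>
    obtain ⟨m, rfl⟩ : ∃ m, n = m + 1 := ⟨n - 1, by omega⟩
    rw [List.take_succ_cons, List.drop_eq_getElem_cons h2, List.cons_lt_cons_iff]
    exact Or.inl (by simpa using h)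

-- the lcp of the prefix with the suffix, from the lcp of the suffix with the whole string
theorem lcp_take_drop (cs : List Char) (n : Nat) :
    lcpLen (cs.take n) (cs.drop n) = min (lcpLen (cs.drop n) cs) n := by
  rw [lcpLen_comm, lcpLen_take]

theorem getD_take_of_lt (cs : List Char) (n j : Nat) (h : j < n) :
    (cs.take n).getD j ' ' = cs.getD j ' ' := by
  simp [List.getD, List.getElem?_take_of_lt h]

theorem getD_drop (cs : List Char) (n j : Nat) :
    (cs.drop n).getD j ' ' = cs.getD (n + j) ' ' := by
  simp [List.getD, List.getElem?_drop]

-- B's O(1) decision from z = lcp(S[i:], S): the case z ≥ i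
theorem decision_ge (cs : List Char) (n : Nat) (h2 : n < cs.length)
    (hz : n ≤ lcpLen (cs.drop n) cs) :
    (cs.take n < cs.drop n) ↔ n + n < cs.length := by
  rw [lt_iff_lcp, lcp_take_drop]
  have hmin : min (lcpLen (cs.drop n) cs) n = n := by omega
  rw [hmin]
  simp [List.length_take, List.length_drop]
  omega

-- the case z < i: a genuine mismatch (or the suffix running out) decides the comparison
theorem decision_lt (cs : List Char) (n : Nat) (h2 : n < cs.length)
    (hz : lcpLen (cs.drop n) cs < n) :
    (cs.take n < cs.drop n) ↔
      (n + lcpLen (cs.drop n) cs < cs.length ∧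
       cs.getD (lcpLen (cs.drop n) cs) ' ' < cs.getD (n + lcpLen (cs.drop n) cs) ' ') := by
  set z := lcpLen (cs.drop n) cs with hzdef
  have hzle : z ≤ cs.length - n := by
    have := lcpLen_le_left (cs.drop n) cs; simpa [List.length_drop] using this
  rw [lt_iff_lcp, lcp_take_drop, ← hzdef]
  have hmin : min z n = z := by omega
  rw [hmin, getD_take_of_lt cs n z hz, getD_drop cs n z]
  simp [List.length_take, List.length_drop]
  constructor
  · rintro (⟨_, hlen, hlt⟩ | ⟨heq, _⟩)
    · exact ⟨by omega, hlt⟩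
    · omega
  · rintro ⟨hlen, hlt⟩
    exact Or.inl ⟨by omega, by omega, hlt⟩

-- loop A computes 'any i, take i < drop i' over its index list
theorem loopA_eq_any (cs : List Char) (is : List Int)
    (h : ∀ i ∈ is, 1 ≤ i ∧ i < (cs.length : Int)) :
    checkLoopA cs is = is.any (fun i => decide (cs.take i.toNat < cs.drop i.toNat)) := by
  induction is with
  | nil => simp [checkLoopA]
  | cons i rest ih =>
    obtain ⟨hi1, hi2⟩ := h i (List.mem_cons_self ..)
    have hrest := fun j hj => h j (List.mem_cons_of_mem _ hj)
    obtain ⟨n, rfl⟩ : ∃ n : Nat, i = (n : Int) := ⟨i.toNat, by omega⟩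
    have hn1 : 1 ≤ n := by omega
    have hn2 : n < cs.length := by omega
    have h0 : 0 < cs.length := by omega
    have hgi : PySem.List.pyGet? cs (n : Int) = some (cs[n]'hn2) := by
      rw [PySem.List.pyGet?_eq_some_getElem cs (by omega) (by exact_mod_cast hn2)]
      simp
    have hg0 : PySem.List.pyGet? cs 0 = some (cs[0]'h0) := by
      rw [PySem.List.pyGet?_eq_some_getElem cs (by omega) (by exact_mod_cast h0)]
      simp
    have hsl : PySem.List.slice cs (some 0) (some (n : Int)) = cs.take n := by
      rw [PySem.List.slice_zero_start, PySem.List.slice_to _ (by omega)]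
      simp
    have hsr : PySem.List.slice cs (some (n : Int)) none = cs.drop n := by
      rw [PySem.List.slice_from _ (by omega)]
      simp
    simp only [checkLoopA, hgi, hg0, hsl, hsr, List.any_cons, Int.toNat_natCast]
    split_ifs with hlt heq hc
    · have hTD : cs.take n < cs.drop n := head_lt_take_lt_drop cs n h0 hn2 hn1 hlt
      simp [hTD]
    · simp [hc]
    · simp [hc, ih hrest]
    · have hc : ¬ (cs.take n < cs.drop n) := by
        intro hlt'
        rcases take_lt_drop_head cs n h0 hn2 hn1 hlt' with h' | h'
        · exact hlt h'
        · exact heq h'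
      simp [hc, ih hrest]

-- loop B computes the same 'any' over its index list
theorem loopB_eq_any (cs : List Char) (is : List Int)
    (h : ∀ i ∈ is, 1 ≤ i ∧ i < (cs.length : Int)) :
    checkLoopB cs (cs.length : Int) is
      = is.any (fun i => decide (cs.take i.toNat < cs.drop i.toNat)) := by
  induction is with
  | nil => simp [checkLoopB]
  | cons i rest ih =>
    obtain ⟨hi1, hi2⟩ := h i (List.mem_cons_self ..)
    have hrest := fun j hj => h j (List.mem_cons_of_mem _ hj)
    obtain ⟨n, rfl⟩ : ∃ n : Nat, i = (n : Int) := ⟨i.toNat, by omega⟩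
    have hn2 : n < cs.length := by omega
    have hzle : lcpLen (cs.drop n) cs ≤ cs.length - n := by
      have := lcpLen_le_left (cs.drop n) cs
      simpa [List.length_drop] using this
    have hcast : (n : Int) + ((lcpLen (cs.drop n) cs : Nat) : Int)
        = ((n + lcpLen (cs.drop n) cs : Nat) : Int) := by push_cast; ring
    simp only [checkLoopB, List.any_cons, Int.toNat_natCast, hcast,
      PySem.List.pyGetD_natCast]
    split_ifs with hge hbig hin hcmp
    · have hTD : cs.take n < cs.drop n :=
        (decision_ge cs n hn2 (by omega)).mpr (by omega)
      simp [hTD]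
    · have hc : ¬ (cs.take n < cs.drop n) := by
        intro hc'
        have := (decision_ge cs n hn2 (by omega)).mp hc'
        omega
      simp [hc, ih hrest]
    · have hTD : cs.take n < cs.drop n :=
        (decision_lt cs n hn2 (by omega)).mpr ⟨by omega, hcmp⟩
      simp [hTD]
    · have hc : ¬ (cs.take n < cs.drop n) := by
        intro hc'
        exact hcmp ((decision_lt cs n hn2 (by omega)).mp hc').2
      simp [hc, ih hrest]
    · have hc : ¬ (cs.take n < cs.drop n) := by
        intro hc'
        have := ((decision_lt cs n hn2 (by omega)).mp hc').1
        omega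
      simp [hc, ih hrest]

-- ===== VERDICT (by name: the statement is the Claim_ definition above) =====
theorem check_spec : Claim_equal_check := by
  intro N S _ hpre
  unfold Spec_check check check_alt
  have hlen : PySem.Str.len S = (S.toList.length : Int) := by simp [pysem]
  rw [hlen]
  by_cases hN : N ≤ 1
  · rw [PySem.List.pyRange_neg_one_eq_nil (by omega), PySem.List.pyRange_one_eq_nil (by omega)]
    rfl
  · have hNle : N ≤ (S.toList.length : Int) := by
      rcases hpre with h | h
      · omega
      · rwa [hlen] at h
    have hmem : ∀ i ∈ PySem.List.pyRange 1 N 1, 1 ≤ i ∧ i < (S.toList.length : Int) := by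
      intro i hi
      rw [PySem.List.mem_pyRange_one] at hi
      omega
    have hrev : PySem.List.pyRange (N - 1) 0 (-1) = (PySem.List.pyRange 1 N 1).reverse := by
      rw [PySem.List.pyRange_neg_one_eq_reverse]
      norm_num
    rw [hrev, loopA_eq_any S.toList _ (fun i hi => hmem i (List.mem_reverse.mp hi)),
      List.any_reverse, loopB_eq_any S.toList _ hmem]
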